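-- pv_equiv track=rewrite | github.com/Capman002/baixar-video-you-tube | src/preview.py | _extract_available_qualities
-- ===== SOURCE A (Python) =====
-- from typing import Optional, List, Dict, Any
--
-- def _extract_available_qualities(formats: List[Dict]) -> List[str]:
--     """Extrai as qualidades disponíveis dos formatos."""
--     qualities = set()
--
--     for fmt in formats:
--         height = fmt.get('height')
--         if height:
--             if height >= 2160:
--                 qualities.add("2160p")
--             elif height >= 1440:
--                 qualities.add("1440p")
--             elif height >= 1080:
--                 qualities.add("1080p")
--             elif height >= 720:
--                 qualities.add("720p")
--             elif height >= 480:
--                 qualities.add("480p")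
--             elif height >= 360:
--                 qualities.add("360p")
--
--     # Ordenar do maior para menor
--     order = ["2160p", "1440p", "1080p", "720p", "480p", "360p"]
--     return [q for q in order if q in qualities]
-- ===== SOURCE B (Python) =====
-- def _extract_available_qualities(formats):
--     """Extrai as qualidades disponíveis dos formatos."""
--     boundaries = [360, 480, 720, 1080, 1440, 2160]
--     labels = ["360p", "480p", "720p", "1080p", "1440p", "2160p"]
--     found = set()
--     for fmt in formats:
--         height = fmt.get('height')
--         if height:
--             # bisect_right over the boundary table (hand-rolled binary search)
--             lo, hi = 0, len(boundaries)
--             while lo < hi: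
--                 mid = (lo + hi) // 2
--                 if height < boundaries[mid]:
--                     hi = mid
--                 else:
--                     lo = mid + 1
--             if lo > 0:
--                 found.add(labels[lo - 1])
--     return [q for q in reversed(labels) if q in found]
-- ===== Notes on version B (the rewrite author's own statement) =====
-- stated objective: alternative
-- what changed: Replaced the six-branch elif cascade with a binary-search (bisect_right) classification over a precomputed boundary table, emitting labels from a parallel array; the output list is the label table filtered in reverse.
import Mathlib
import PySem

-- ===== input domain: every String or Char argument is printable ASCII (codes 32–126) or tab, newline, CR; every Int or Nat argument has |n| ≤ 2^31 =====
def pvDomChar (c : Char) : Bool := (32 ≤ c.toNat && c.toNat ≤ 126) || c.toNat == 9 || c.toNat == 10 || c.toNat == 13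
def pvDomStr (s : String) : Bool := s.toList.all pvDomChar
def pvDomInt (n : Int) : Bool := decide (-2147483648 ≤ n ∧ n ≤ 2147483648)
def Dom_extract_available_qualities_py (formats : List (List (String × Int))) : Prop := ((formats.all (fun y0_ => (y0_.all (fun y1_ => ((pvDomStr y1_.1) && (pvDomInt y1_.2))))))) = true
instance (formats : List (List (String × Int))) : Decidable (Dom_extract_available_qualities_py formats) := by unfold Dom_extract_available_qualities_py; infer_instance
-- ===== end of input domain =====

-- File claim: B classifies each height by binary search over a boundary table instead of A's
-- elif cascade; same return value, proved equal on all inputs.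

-- ===== PORT A =====
def extract_available_qualities_py (formats : List (List (String × Int))) : List String :=
  let qualities : PySem.Set String :=
    formats.foldl (fun (qs : PySem.Set String) (fmt : List (String × Int)) =>
      match (PySem.Dict.mk fmt).get? "height" with
      | none => qs
      | some height =>
        if height ≠ 0 then
          if height ≥ 2160 then qs.add "2160p"
          else if height ≥ 1440 then qs.add "1440p"
          else if height ≥ 1080 then qs.add "1080p"
          else if height ≥ 720 then qs.add "720p"
          else if height ≥ 480 then qs.add "480p"
          else if height ≥ 360 then qs.add "360p"
          else qs
        else qs) PySem.Set.empty
  let order := ["2160p", "1440p", "1080p", "720p", "480p", "360p"]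
  order.filter (fun q => PySem.Set.contains qualities q)

-- ===== PORT B =====
-- hand-rolled bisect_right loop from Source B, step for step
def pvBisectLoop (boundaries : List Int) (height : Int) (lo hi : Nat) : Nat :=
  if lo < hi then
    let mid := (lo + hi) / 2
    if height < (boundaries.getD mid 0) then pvBisectLoop boundaries height lo mid
    else pvBisectLoop boundaries height (mid + 1) hi
  else lo
termination_by hi - lo
decreasing_by all_goals omega

def extract_available_qualities_py_alt (formats : List (List (String × Int))) : List String :=
  let boundaries : List Int := [360, 480, 720, 1080, 1440, 2160]
  let labels := ["360p", "480p", "720p", "1080p", "1440p", "2160p"]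
  let found : PySem.Set String :=
    formats.foldl (fun (fs : PySem.Set String) (fmt : List (String × Int)) =>
      match (PySem.Dict.mk fmt).get? "height" with
      | none => fs
      | some height =>
        if height ≠ 0 then
          let lo := pvBisectLoop boundaries height 0 boundaries.length
          if lo > 0 then fs.add (labels.getD (lo - 1) "") else fs
        else fs) PySem.Set.empty
  labels.reverse.filter (fun q => PySem.Set.contains found q)

-- ===== PRECONDITION & SPEC =====
def Spec_extract_available_qualities_py (formats : List (List (String × Int))) (out : List String) : Prop := out = extract_available_qualities_py_alt formats
instance (formats : List (List (String × Int))) (out : List String) : Decidable (Spec_extract_available_qualities_py formats out) := by unfold Spec_extract_available_qualities_py; infer_instance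

-- ===== CLAIM (what is proved, stated in full; the proofs are below) =====
def Claim_equal_extract_available_qualities_py : Prop := ∀ (formats : List (List (String × Int))), Dom_extract_available_qualities_py formats → Spec_extract_available_qualities_py formats (extract_available_qualities_py formats)

-- ===== LEMMAS AND PROOFS =====

-- B's binary search over the concrete table agrees with A's cascade, index-wise
lemma pvBisect_eval (h : Int) :
    pvBisectLoop [360, 480, 720, 1080, 1440, 2160] h 0 6 =
      if h ≥ 2160 then 6 else if h ≥ 1440 then 5 else if h ≥ 1080 then 4
      else if h ≥ 720 then 3 else if h ≥ 480 then 2 else if h ≥ 360 then 1 else 0 := by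
  by_cases c1 : h < 360 <;> by_cases c2 : h < 480 <;> by_cases c3 : h < 720 <;>
    by_cases c4 : h < 1080 <;> by_cases c5 : h < 1440 <;> by_cases c6 : h < 2160 <;>
    first
      | omega
      | (simp [pvBisectLoop, c1, c2, c3, c4, c5, c6]; try (split_ifs <;> omega))

-- the two fold steps are the same function
lemma pv_step_eq :
    (fun (qs : PySem.Set String) (fmt : List (String × Int)) =>
      match (PySem.Dict.mk fmt).get? "height" with
      | none => qs
      | some height =>
        if height ≠ 0 then
          if height ≥ 2160 then qs.add "2160p"
          else if height ≥ 1440 then qs.add "1440p"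
          else if height ≥ 1080 then qs.add "1080p"
          else if height ≥ 720 then qs.add "720p"
          else if height ≥ 480 then qs.add "480p"
          else if height ≥ 360 then qs.add "360p"
          else qs
        else qs) =
    (fun (fs : PySem.Set String) (fmt : List (String × Int)) =>
      match (PySem.Dict.mk fmt).get? "height" with
      | none => fs
      | some height =>
        if height ≠ 0 then
          let lo := pvBisectLoop [360, 480, 720, 1080, 1440, 2160] height 0
            ([360, 480, 720, 1080, 1440, 2160] : List Int).length
          if lo > 0 then fs.add ((["360p", "480p", "720p", "1080p", "1440p", "2160p"]).getD (lo - 1) "") else fs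
        else fs) := by
  funext qs fmt
  cases (PySem.Dict.mk fmt).get? "height" with
  | none => rfl
  | some h =>
    simp only [List.length]
    by_cases h0 : h ≠ 0
    · simp only [if_pos h0, pvBisect_eval h]
      split_ifs <;> first | rfl | omega
    · simp [h0]

-- ===== VERDICT (by name: the statement is the Claim_ definition above) =====
theorem extract_available_qualities_py_spec : Claim_equal_extract_available_qualities_py := by
  intro formats _
  unfold Spec_extract_available_qualities_py
  simp only [extract_available_qualities_py, extract_available_qualities_py_alt]
  rw [pv_step_eq]
  rfl
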